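-- pv_equiv track=rewrite | github.com/Thernn88/SAPPHYRE | sapphyre/merge_overlap.py | calculate_split
-- ===== SOURCE A (Python) =====
-- from typing import Union, Literal
--
-- def get_start_end(sequence: str) -> tuple:
--     """
--     Returns index of first and last none dash character in sequence.
--     """
--     start = None
--     end = None
--     for i, character in enumerate(sequence):
--         if character != "-":
--             start = i
--             break
--     for i in range(len(sequence) - 1, -1, -1):
--         if sequence[i] != "-":
--             end = i
--             break
--     return start, end
--
-- def find_overlap(
--     tuple_a: tuple, tuple_b: tuple, allowed_deviation: int = 1
-- ) -> Union[tuple, None]: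
--     """
--     Takes two start/end pairs and returns the overlap.
--     """
--     start = max(tuple_a[0], tuple_b[0])
--     end = min(tuple_a[1], tuple_b[1])
--     if end - start < -allowed_deviation:
--         return None
--     return start, end
--
-- def calculate_split(sequence_a: str, sequence_b: str, comparison_sequence: str) -> int:
--     """
--     Iterates over each position in the overlap range of sequence A and sequence B and
--     creates a frankenstein sequence of sequence A + Sequence B joined at each
--     position in the overlap.
--
--     Final split position = pos in overlap with the highest score.
--
--     Score is determined by the amount of characters that are the same between each
--     position in the frankenstein sequence and the comparison sequence.
--     """
--     pair_a = get_start_end(sequence_a)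
--     pair_b = get_start_end(sequence_b)
--
--     overlap_start, overlap_end = find_overlap(pair_a, pair_b, 0)
--
--     sequence_a_overlap = sequence_a[overlap_start : overlap_end + 1]
--     sequence_b_overlap = sequence_b[overlap_start : overlap_end + 1]
--     comparison_overlap = comparison_sequence[overlap_start : overlap_end + 1]
--
--     base_score = 0
--     highest_scoring_pos = 0
--
--     for i, character in enumerate(sequence_b_overlap):
--         if character == comparison_overlap[i]:
--             base_score += 1
--     highest_score = base_score
--
--     for i, character_a in enumerate(sequence_a_overlap):
--         if sequence_b_overlap[i] == comparison_overlap[i]: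
--             base_score -= 1
--         if character_a == comparison_overlap[i]:
--             base_score += 1
--         if base_score >= highest_score:
--             highest_score = base_score
--             highest_scoring_pos = i
--     return highest_scoring_pos + overlap_start
-- ===== SOURCE B (Python) =====
-- def get_start_end(sequence: str) -> tuple:
--     """Returns index of first and last non-dash character in sequence."""
--     indices = [i for i, character in enumerate(sequence) if character != "-"]
--     if not indices:
--         return None, None
--     return indices[0], indices[-1]
--
--
-- def calculate_split(sequence_a: str, sequence_b: str, comparison_sequence: str) -> int:
--     """Rebuild-and-rescan version: for each split point, build the frankenstein
--     sequence explicitly and count its matches against the comparison overlap."""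
--     start_a, end_a = get_start_end(sequence_a)
--     start_b, end_b = get_start_end(sequence_b)
--     overlap_start = max(start_a, start_b)
--     overlap_end = min(end_a, end_b)
--
--     a_ov = sequence_a[overlap_start : overlap_end + 1]
--     b_ov = sequence_b[overlap_start : overlap_end + 1]
--     c_ov = comparison_sequence[overlap_start : overlap_end + 1]
--
--     best = sum(1 for x, y in zip(b_ov, c_ov) if x == y)
--     best_pos = 0
--     for i in range(len(a_ov)):
--         frankenstein = a_ov[: i + 1] + b_ov[i + 1 :]
--         score = sum(1 for x, y in zip(frankenstein, c_ov) if x == y)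
--         if score >= best:
--             best = score
--             best_pos = i
--     return best_pos + overlap_start
-- ===== Notes on version B (the rewrite author's own statement) =====
-- stated objective: alternative
-- what changed: Instead of A's single-pass incremental score update (subtract the B-match, add the A-match, carry a running score), B rebuilds the frankenstein sequence a_ov[:i+1]+b_ov[i+1:] at every split point and rescans it against the comparison overlap, keeping the best (>=, later ties win) position.
import Mathlib
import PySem

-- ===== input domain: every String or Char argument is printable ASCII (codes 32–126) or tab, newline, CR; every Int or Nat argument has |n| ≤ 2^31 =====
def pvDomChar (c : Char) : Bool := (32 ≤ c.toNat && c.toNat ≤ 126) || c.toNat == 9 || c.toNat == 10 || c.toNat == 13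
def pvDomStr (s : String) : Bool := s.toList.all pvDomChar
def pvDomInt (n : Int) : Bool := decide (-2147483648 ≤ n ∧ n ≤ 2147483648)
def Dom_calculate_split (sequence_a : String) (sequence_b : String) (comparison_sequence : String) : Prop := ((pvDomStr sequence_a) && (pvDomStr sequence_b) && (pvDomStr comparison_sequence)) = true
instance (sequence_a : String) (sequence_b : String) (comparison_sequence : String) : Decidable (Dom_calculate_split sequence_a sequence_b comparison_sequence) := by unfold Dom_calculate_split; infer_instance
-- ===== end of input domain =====

-- B rebuilds and rescans the frankenstein string at every split point instead of A's
-- incremental running-score update; alternative decomposition, not faster.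

-- ===== PORT A =====
-- get_start_end, first loop: scan forward, break at first non-dash
def pvFirstNonDash : List Char → Nat → Option Nat
  | [], _ => none
  | c :: t, i => if c ≠ '-' then some i else pvFirstNonDash t (i + 1)

-- get_start_end, second loop: `for i in range(len(s)-1, -1, -1)`, break at first non-dash
def pvLastNonDash (s : List Char) : Nat → Option Nat
  | 0 => none
  | i + 1 => if s.getD i '-' ≠ '-' then some i else pvLastNonDash s i

def getStartEnd (s : List Char) : Option Nat × Option Nat :=
  (pvFirstNonDash s 0, pvLastNonDash s s.length)

-- A's base-score loop `for i, ch in enumerate(b_ov): if ch == c_ov[i]`; the index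
-- access c_ov[i] is ported by peeling c_ov in step with b_ov (exact whenever
-- |c_ov| ≥ |b_ov|, which Pre_ guarantees; Python raises IndexError otherwise).
def pvBaseLoop : List Char → List Char → Int → Int
  | b :: bs, c :: cs, acc => pvBaseLoop bs cs (if b = c then acc + 1 else acc)
  | _, _, acc => acc

-- A's main loop: incremental score update, same peeled indexing for b_ov[i], c_ov[i]
def pvMainLoop : List Char → List Char → List Char → Int → Int → Int → Int → Int
  | a :: as, b :: bs, c :: cs, i, sc, hs, pos =>
    let sc1 := if b = c then sc - 1 else sc
    let sc2 := if a = c then sc1 + 1 else sc1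
    if sc2 ≥ hs then pvMainLoop as bs cs (i + 1) sc2 sc2 i
    else pvMainLoop as bs cs (i + 1) sc2 hs pos
  | _, _, _, _, _, _, pos => pos

def calculate_split (sequence_a : String) (sequence_b : String) (comparison_sequence : String) : Int :=
  match getStartEnd sequence_a.toList, getStartEnd sequence_b.toList with
  | (some sa, some ea), (some sb, some eb) =>
      let start := max sa sb
      let stop := min ea eb
      if stop < start then 0 -- find_overlap returns None, Python raises unpacking it (excluded by Pre_)
      else
        let aov := (sequence_a.toList.drop start).take (stop + 1 - start)
        let bov := (sequence_b.toList.drop start).take (stop + 1 - start)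
        let cov := (comparison_sequence.toList.drop start).take (stop + 1 - start)
        let base := pvBaseLoop bov cov 0
        pvMainLoop aov bov cov 0 base base 0 + (start : Int)
  | _, _ => 0 -- a start/end is None, Python's max/min raises TypeError (excluded by Pre_)

-- ===== PORT B =====
-- B's get_start_end: `[i for i, ch in enumerate(seq) if ch != '-']`, then first/last
def pvEnumAlt (s : List Char) (i : Nat) : List (Nat × Char) :=
  match s with
  | [] => []
  | c :: t => (i, c) :: pvEnumAlt t (i + 1)

def pvNonDashIdxs (s : List Char) : List Nat :=
  ((pvEnumAlt s 0).filter (fun p => p.2 ≠ '-')).map Prod.fst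

-- returns (indices.head?, indices.getLast?): exactly (None, None) when indices is empty
def pvSpanAlt (s : List Char) : Option Nat × Option Nat :=
  let idxs := pvNonDashIdxs s
  (idxs.head?, idxs.getLast?)

-- `sum(1 for x, y in zip(xs, ys) if x == y)`
def pvMatchCount : List Char → List Char → Int
  | x :: xs, y :: ys => (if x = y then 1 else 0) + pvMatchCount xs ys
  | _, _ => 0

def calculate_split_alt (sequence_a : String) (sequence_b : String) (comparison_sequence : String) : Int :=
  let pa := pvSpanAlt sequence_a.toList
  let pb := pvSpanAlt sequence_b.toList
  -- Python's max/min(None, ..) raises TypeError; excluded by Pre_, 0 keeps the port total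
  if pa.1.isNone || pa.2.isNone || pb.1.isNone || pb.2.isNone then 0
  else
    let start := max (pa.1.getD 0) (pb.1.getD 0)
    let stop := min (pa.2.getD 0) (pb.2.getD 0)
    let aov := (sequence_a.toList.drop start).take (stop + 1 - start)
    let bov := (sequence_b.toList.drop start).take (stop + 1 - start)
    let cov := (comparison_sequence.toList.drop start).take (stop + 1 - start)
    let st := (List.range aov.length).foldl
      (fun (st : Int × Int) i =>
        let franken := aov.take (i + 1) ++ bov.drop (i + 1)
        let score := pvMatchCount franken cov
        if score ≥ st.1 then (score, (i : Int)) else st)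
      (pvMatchCount bov cov, 0)
    st.2 + (start : Int)

-- ===== PRECONDITION & SPEC =====
-- Pre_ holds exactly where the Python A returns: both sequences contain a non-dash
-- character, the overlap is non-empty, and the comparison sequence covers the overlap
-- (otherwise A raises TypeError on max/min(None,..), on unpacking None, or IndexError).
-- index of the first / last non-dash character, stated with library findIdx
def pvFirstIdx (s : List Char) : Nat := s.findIdx (· ≠ '-')
def pvLastIdx (s : List Char) : Nat := s.length - 1 - s.reverse.findIdx (· ≠ '-')

def Pre_calculate_split (sequence_a : String) (sequence_b : String) (comparison_sequence : String) : Prop :=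
  sequence_a.toList.any (· ≠ '-') = true ∧ sequence_b.toList.any (· ≠ '-') = true ∧
  max (pvFirstIdx sequence_a.toList) (pvFirstIdx sequence_b.toList)
    ≤ min (pvLastIdx sequence_a.toList) (pvLastIdx sequence_b.toList) ∧
  min (pvLastIdx sequence_a.toList) (pvLastIdx sequence_b.toList) + 1 ≤ comparison_sequence.toList.length

instance (sequence_a : String) (sequence_b : String) (comparison_sequence : String) : Decidable (Pre_calculate_split sequence_a sequence_b comparison_sequence) := by unfold Pre_calculate_split; infer_instance

def pvWitness_calculate_split : String × String × String := ("AB", "AB", "AB")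

def Spec_calculate_split (sequence_a : String) (sequence_b : String) (comparison_sequence : String) (out : Int) : Prop := out = calculate_split_alt sequence_a sequence_b comparison_sequence
instance (sequence_a : String) (sequence_b : String) (comparison_sequence : String) (out : Int) : Decidable (Spec_calculate_split sequence_a sequence_b comparison_sequence out) := by unfold Spec_calculate_split; infer_instance

-- ===== CLAIM (what is proved, stated in full; the proofs are below) =====
def Claim_equal_calculate_split : Prop := ∀ (sequence_a : String) (sequence_b : String) (comparison_sequence : String), Dom_calculate_split sequence_a sequence_b comparison_sequence → Pre_calculate_split sequence_a sequence_b comparison_sequence → Spec_calculate_split sequence_a sequence_b comparison_sequence (calculate_split sequence_a sequence_b comparison_sequence)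

-- ===== LEMMAS AND PROOFS =====

-- common reference scan over (position, score) pairs, later ties (≥) win
def pvScan : List (Int × Int) → Int × Int → Int
  | [], st => st.2
  | p :: t, st => if p.2 ≥ st.1 then pvScan t (p.2, p.1) else pvScan t st

-- the stream of (position, running score) pairs A's main loop produces
def pvDeltas : List Char → List Char → List Char → Int → Int → List (Int × Int)
  | a :: as, b :: bs, c :: cs, i, sc =>
      let sc1 := if b = c then sc - 1 else sc
      let sc2 := if a = c then sc1 + 1 else sc1
      (i, sc2) :: pvDeltas as bs cs (i + 1) sc2
  | _, _, _, _, _ => []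

theorem pvLastNonDash_lt (s : List Char) : ∀ (k e : Nat), pvLastNonDash s k = some e → e < k := by
  intro k
  induction k with
  | zero => intro e h; simp [pvLastNonDash] at h
  | succ i ih =>
      intro e h
      rw [pvLastNonDash] at h
      split at h
      · simp only [Option.some.injEq] at h; omega
      · exact Nat.lt_succ_of_lt (ih e h)

theorem pvEnumAlt_append (t : List Char) (x : Char) :
    ∀ (i : Nat), pvEnumAlt (t ++ [x]) i = pvEnumAlt t i ++ [(i + t.length, x)] := by
  induction t with
  | nil => intro i; simp [pvEnumAlt]
  | cons c u ih =>
      intro i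
      simp only [List.cons_append, pvEnumAlt, ih (i + 1), List.length_cons]
      have h : i + 1 + u.length = i + (u.length + 1) := by omega
      rw [h]

theorem pvSpanAlt_head : ∀ (s : List Char) (i : Nat),
    (((pvEnumAlt s i).filter (fun p => p.2 ≠ '-')).map Prod.fst).head? = pvFirstNonDash s i := by
  intro s
  induction s with
  | nil => intro i; rfl
  | cons c t ih =>
      intro i
      by_cases hc : c ≠ '-'
      · simp [pvEnumAlt, pvFirstNonDash, hc]
      · have hc' : c = '-' := by tauto
        subst hc'
        rw [show pvFirstNonDash ('-' :: t) i = pvFirstNonDash t (i + 1) from by simp [pvFirstNonDash]]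
        rw [← ih (i + 1)]
        simp [pvEnumAlt]

theorem pvLastNonDash_stable (t : List Char) (x : Char) :
    ∀ (k : Nat), k ≤ t.length → pvLastNonDash (t ++ [x]) k = pvLastNonDash t k := by
  intro k
  induction k with
  | zero => intro _; rfl
  | succ i ih =>
      intro hk
      have hi : i < t.length := by omega
      have hgd : (t ++ [x]).getD i '-' = t.getD i '-' := by
        rw [List.getD_append _ _ _ _ hi]
      simp only [pvLastNonDash, hgd]
      rw [ih (by omega)]

theorem pvSpanAlt_last : ∀ (s : List Char),
    (((pvEnumAlt s 0).filter (fun p => p.2 ≠ '-')).map Prod.fst).getLast? = pvLastNonDash s s.length := by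
  intro s
  induction s using List.reverseRecOn with
  | nil => rfl
  | append_singleton t x ih =>
      rw [pvEnumAlt_append t x 0, List.filter_append, List.map_append]
      have hlen : (t ++ [x]).length = t.length + 1 := by simp
      have hgd : (t ++ [x]).getD t.length '-' = x := by simp [List.getD]
      by_cases hx : x ≠ '-'
      · rw [hlen]
        simp only [pvLastNonDash, hgd, if_pos hx]
        simp [hx]
      · have hx' : x = '-' := by tauto
        rw [hlen]
        simp only [pvLastNonDash, hgd]
        rw [if_neg (by simp [hx'])]
        rw [pvLastNonDash_stable t x t.length (le_refl _)]
        rw [show List.filter (fun p => decide (p.2 ≠ '-')) [((0 : Nat) + t.length, x)] = [] from by simp [hx']]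
        rw [List.map_nil, List.append_nil]
        exact ih

theorem pvSpanAlt_eq (s : List Char) : pvSpanAlt s = getStartEnd s := by
  simp only [pvSpanAlt, pvNonDashIdxs, getStartEnd]
  rw [pvSpanAlt_head s 0, pvSpanAlt_last s]

theorem pvFirstNonDash_eq_findIdx : ∀ (s : List Char), s.any (· ≠ '-') = true →
    ∀ (k : Nat), pvFirstNonDash s k = some (k + pvFirstIdx s) := by
  intro s
  induction s with
  | nil => intro h; simp at h
  | cons c t ih =>
      intro h k
      by_cases hc : c ≠ '-'
      · simp [pvFirstNonDash, pvFirstIdx, hc, List.findIdx_cons]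
      · have hc' : c = '-' := by tauto
        subst hc'
        have ht : t.any (· ≠ '-') = true := by simpa using h
        simp only [pvFirstNonDash, if_neg (show ¬('-' ≠ '-') by simp)]
        rw [ih ht (k + 1)]
        simp [pvFirstIdx, List.findIdx_cons]
        omega

theorem pvLastNonDash_eq_findIdx : ∀ (s : List Char), s.any (· ≠ '-') = true →
    pvLastNonDash s s.length = some (pvLastIdx s) := by
  intro s
  induction s using List.reverseRecOn with
  | nil => intro h; simp at h
  | append_singleton t x ih =>
      intro h
      have hlen : (t ++ [x]).length = t.length + 1 := by simp
      have hgd : (t ++ [x]).getD t.length '-' = x := by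
        simp [List.getD]
      by_cases hx : x ≠ '-'
      · rw [hlen]
        simp only [pvLastNonDash, hgd, if_pos hx]
        simp [pvLastIdx, List.findIdx_cons, hx]
      · have hx' : x = '-' := by tauto
        have ht : t.any (· ≠ '-') = true := by
          simp [hx'] at h; simpa using h
        rw [hlen]
        simp only [pvLastNonDash, hgd]
        rw [if_neg (by simp [hx'])]
        rw [pvLastNonDash_stable t x t.length (le_refl _), ih ht]
        have hj : t.reverse.findIdx (· ≠ '-') < t.length := by
          have : ∃ c ∈ t.reverse, (fun c => decide (c ≠ '-')) c = true := by
            simp only [List.any_eq_true] at ht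
            obtain ⟨c, hc1, hc2⟩ := ht
            exact ⟨c, by simp [hc1], hc2⟩
          have := List.findIdx_lt_length_of_exists this
          simpa using this
        simp only [pvLastIdx, List.reverse_append, List.reverse_singleton,
          List.singleton_append, List.findIdx_cons, hx']
        simp only [Option.some.injEq]
        simp
        omega

theorem pvBaseLoop_eq : ∀ (bs cs : List Char) (acc : Int), pvBaseLoop bs cs acc = acc + pvMatchCount bs cs := by
  intro bs
  induction bs with
  | nil => intro cs acc; cases cs <;> simp [pvBaseLoop, pvMatchCount]
  | cons b bt ih =>
      intro cs acc
      cases cs with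
      | nil => simp [pvBaseLoop, pvMatchCount]
      | cons c ct => simp [pvBaseLoop, pvMatchCount, ih]; split_ifs <;> ring

theorem pvMainLoop_eq_scan : ∀ (A B C : List Char) (i sc hs pos : Int),
    pvMainLoop A B C i sc hs pos = pvScan (pvDeltas A B C i sc) (hs, pos) := by
  intro A
  induction A with
  | nil => intro B C i sc hs pos; simp [pvMainLoop, pvDeltas, pvScan]
  | cons a at_ ih =>
      intro B C i sc hs pos
      cases B with
      | nil => simp [pvMainLoop, pvDeltas, pvScan]
      | cons b bt =>
        cases C with
        | nil => simp [pvMainLoop, pvDeltas, pvScan]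
        | cons c ct =>
          simp only [pvMainLoop, pvDeltas, pvScan]
          split_ifs <;> apply ih

theorem pvFold_eq_scan : ∀ (l : List Nat) (g : Nat → Int) (st : Int × Int),
    (l.foldl (fun (st : Int × Int) (i : Nat) => if g i ≥ st.1 then (g i, (i : Int)) else st) st).2
      = pvScan (l.map (fun (i : Nat) => ((i : Int), g i))) st := by
  intro l
  induction l with
  | nil => intro g st; simp [pvScan]
  | cons x t ih =>
      intro g st
      simp only [List.foldl_cons, List.map_cons, pvScan]
      split_ifs <;> apply ih

theorem pvDeltas_eq : ∀ (A B C : List Char) (k : Int) (i0 : Int),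
    A.length = B.length → B.length = C.length →
    pvDeltas A B C i0 (k + pvMatchCount B C)
      = (List.range A.length).map
          (fun (j : Nat) => (i0 + (j : Int), k + pvMatchCount (A.take (j + 1) ++ B.drop (j + 1)) C)) := by
  intro A
  induction A with
  | nil => intro B C k i0 h1 h2; simp [pvDeltas]
  | cons a at_ ih =>
      intro B C k i0 h1 h2
      cases B with
      | nil => simp at h1
      | cons b bt =>
        cases C with
        | nil => simp at h2
        | cons c ct =>
          simp only [List.length_cons] at h1 h2
          have hsc2 : (if a = c then (if b = c then k + pvMatchCount (b :: bt) (c :: ct) - 1 else k + pvMatchCount (b :: bt) (c :: ct)) + 1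
                        else (if b = c then k + pvMatchCount (b :: bt) (c :: ct) - 1 else k + pvMatchCount (b :: bt) (c :: ct)))
              = (k + (if a = c then 1 else 0)) + pvMatchCount bt ct := by
            simp only [pvMatchCount]
            split_ifs <;> ring
          simp only [pvDeltas]
          rw [hsc2, ih bt ct (k + (if a = c then 1 else 0)) (i0 + 1) (by omega) (by omega)]
          rw [List.length_cons, List.range_succ_eq_map, List.map_cons, List.map_map]
          congr 1
          · rw [Prod.ext_iff]
            refine ⟨by push_cast; ring, ?_⟩
            simp only [List.take_succ_cons, List.take_zero, List.drop_succ_cons, List.drop_zero,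
              List.singleton_append, pvMatchCount]
            split_ifs <;> ring
          · apply List.map_congr_left
            intro j _
            simp only [Function.comp_apply, Nat.succ_eq_add_one]
            rw [Prod.ext_iff]
            refine ⟨by push_cast; ring, ?_⟩
            have hfr : (a :: at_).take (j + 1 + 1) ++ (b :: bt).drop (j + 1 + 1)
                = a :: (at_.take (j + 1) ++ bt.drop (j + 1)) := by simp
            rw [hfr]
            simp only [pvMatchCount]
            split_ifs <;> ring

theorem calculate_split_spec : Claim_equal_calculate_split := by
  intro sequence_a sequence_b sequence_c _ hpre
  unfold Spec_calculate_split calculate_split calculate_split_alt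
  unfold Pre_calculate_split at hpre
  obtain ⟨hAny1, hAny2, h5, h6⟩ := hpre
  set sa := pvFirstIdx sequence_a.toList with hsa
  set ea := pvLastIdx sequence_a.toList with hea
  set sb := pvFirstIdx sequence_b.toList with hsb
  set eb := pvLastIdx sequence_b.toList with heb
  have hpa' : getStartEnd sequence_a.toList = (some sa, some ea) := by
    unfold getStartEnd
    rw [pvFirstNonDash_eq_findIdx _ hAny1 0, pvLastNonDash_eq_findIdx _ hAny1]
    simp [hsa, hea]
  have hpb' : getStartEnd sequence_b.toList = (some sb, some eb) := by
    unfold getStartEnd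
    rw [pvFirstNonDash_eq_findIdx _ hAny2 0, pvLastNonDash_eq_findIdx _ hAny2]
    simp [hsb, heb]
  rw [pvSpanAlt_eq sequence_a.toList, pvSpanAlt_eq sequence_b.toList, hpa', hpb']
  simp only [Option.isNone_some, Bool.or_self,
    Bool.false_eq_true, if_false, Option.getD_some]

  have hnot : ¬ (min ea eb < max sa sb) := by omega
  simp only [hnot, if_false]
  -- abbreviations
  set start := max sa sb with hstart
  set stop := min ea eb with hstop
  set aov := (sequence_a.toList.drop start).take (stop + 1 - start) with haov
  set bov := (sequence_b.toList.drop start).take (stop + 1 - start) with hbov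
  set cov := (sequence_c.toList.drop start).take (stop + 1 - start) with hcov
  -- rewrite A's two loops into the reference scan
  rw [pvBaseLoop_eq, pvMainLoop_eq_scan]
  simp only [zero_add]
  -- lengths of the three overlap slices are equal
  have hla : ea < sequence_a.toList.length := pvLastNonDash_lt sequence_a.toList sequence_a.toList.length ea (by
    have := congrArg Prod.snd hpa'
    simpa [getStartEnd] using this)
  have hlb : eb < sequence_b.toList.length := pvLastNonDash_lt sequence_b.toList sequence_b.toList.length eb (by
    have := congrArg Prod.snd hpb'
    simpa [getStartEnd] using this)
  have hlenA : aov.length = stop + 1 - start := by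
    rw [haov, List.length_take, List.length_drop]; omega
  have hlenB : bov.length = stop + 1 - start := by
    rw [hbov, List.length_take, List.length_drop]; omega
  have hlenC : cov.length = stop + 1 - start := by
    rw [hcov, List.length_take, List.length_drop]; omega
  have hD := pvDeltas_eq aov bov cov 0 0 (by omega) (by omega)
  simp only [zero_add] at hD
  rw [hD, pvFold_eq_scan (List.range aov.length)
        (fun i => pvMatchCount (aov.take (i + 1) ++ bov.drop (i + 1)) cov)
        (pvMatchCount bov cov, 0)]
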